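-- pv_equiv track=rewrite | github.com/setupranali/setupranali.github.io | app/adapters/clickhouse_adapter.py | convert_placeholders
-- ===== SOURCE A (Python) =====
-- from typing import Any, Dict, List, Optional, Tuple
--
-- def convert_placeholders(sql: str, params: Optional[List[Any]] = None) -> Tuple[str, Dict[str, Any]]:
--     """
--     Convert ? placeholders to ClickHouse named parameters.
--
--     ClickHouse uses {param_name:Type} format for parameters.
--     We convert positional ? to {p0}, {p1}, etc.
--
--     The clickhouse-connect library handles type inference.
--
--     Returns:
--         (converted_sql, parameter_dict)
--     """
--     if not params:
--         return sql, {}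
--
--     param_dict = {}
--     param_index = 0
--     converted_sql = ""
--     i = 0
--
--     while i < len(sql):
--         if sql[i] == '?':
--             param_name = f"p{param_index}"
--             # Use simple format - clickhouse-connect handles types
--             converted_sql += f"{{{param_name}}}"
--             param_dict[param_name] = params[param_index]
--             param_index += 1
--         else:
--             converted_sql += sql[i]
--         i += 1
--
--     return converted_sql, param_dict
-- ===== SOURCE B (Python) =====
-- from typing import Any, Dict, List, Optional, Tuple
--
-- def convert_placeholders(sql: str, params: Optional[List[Any]] = None) -> Tuple[str, Dict[str, Any]]:
--     """Split on the placeholder character and reassemble with named placeholders spliced in."""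
--     if not params:
--         return sql, {}
--     parts = sql.split('?')
--     n = len(parts) - 1
--     converted = parts[0] + ''.join('{p' + str(i) + '}' + parts[i + 1] for i in range(n))
--     return converted, {'p' + str(i): params[i] for i in range(n)}
-- ===== Notes on version B (the rewrite author's own statement) =====
-- stated objective: faster
-- what changed: Replaces the char-by-char while loop that grows the output string and dict entry by entry (repeated string concatenation, quadratic) with a partition-then-reassemble pass: split the SQL on the placeholder character, join the segments with the named placeholders spliced in, and build the parameter dict with one comprehension over the placeholder count. Intended as faster; a timing run measured B 39x-94x faster at the largest generated sizes.
import Mathlib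
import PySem

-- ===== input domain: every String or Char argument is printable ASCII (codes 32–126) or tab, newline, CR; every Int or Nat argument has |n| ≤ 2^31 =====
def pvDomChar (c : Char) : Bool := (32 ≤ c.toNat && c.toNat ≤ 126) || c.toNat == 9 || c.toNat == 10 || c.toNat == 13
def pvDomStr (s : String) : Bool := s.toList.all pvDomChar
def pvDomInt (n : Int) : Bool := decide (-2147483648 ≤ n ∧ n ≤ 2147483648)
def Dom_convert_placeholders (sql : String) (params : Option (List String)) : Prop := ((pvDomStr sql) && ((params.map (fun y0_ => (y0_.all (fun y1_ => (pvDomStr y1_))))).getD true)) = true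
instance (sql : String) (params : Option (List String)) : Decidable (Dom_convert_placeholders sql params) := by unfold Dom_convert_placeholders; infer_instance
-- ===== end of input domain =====

-- B replaces A's char-by-char accumulation loop (quadratic string appends) by split-then-join reassembly with named placeholders; intended as faster (measured up to ~40-90x on the check's largest inputs).


-- ===== PORT A =====
-- the while loop over sql's characters: state = (param_index, param_dict, converted_sql)
def convertLoopA (ps : List String) : List Char → Int → PySem.Dict String String → List Char → List Char × PySem.Dict String String
  | [], _, d, acc => (acc, d)
  | c :: rest, idx, d, acc =>
    if c = '?' then
      let name := "p" ++ PySem.Int.toStr idx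
      convertLoopA ps rest (idx + 1) (d.insert name (PySem.List.pyGetD ps idx ""))
        (acc ++ ('{' :: name.toList ++ ['}']))
    else
      convertLoopA ps rest idx d (acc ++ [c])

def convert_placeholders (sql : String) (params : Option (List String)) : String × (List (String × String)) :=
  match params with
  | none => (sql, [])
  | some ps =>
    if ps = [] then (sql, [])
    else
      let r := convertLoopA ps sql.toList 0 PySem.Dict.empty []
      (String.ofList r.1, r.2.items)

-- ===== PORT B =====
def convert_placeholders_alt (sql : String) (params : Option (List String)) : String × (List (String × String)) :=
  match params with
  | none => (sql, [])
  | some ps =>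
    if ps = [] then (sql, [])
    else
      let parts := sql.toList.splitOn '?'           -- sql.split('?')
      let n := parts.length - 1
      let converted := parts.headD [] ++
        ((List.range n).map (fun (i : Nat) =>
          ('{' :: ("p" ++ PySem.Int.toStr ((i : Nat) : Int)).toList ++ ['}']) ++ parts.getD (i + 1) [])).flatten
      (String.ofList converted,
       (List.range n).map (fun (i : Nat) => ("p" ++ PySem.Int.toStr ((i : Nat) : Int), PySem.List.pyGetD ps ((i : Nat) : Int) "")))

-- ===== PRECONDITION & SPEC =====
-- Pre_ excludes exactly the inputs where Python A raises IndexError: a non-empty params list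
-- with more question-mark placeholders in sql than parameters.
def Pre_convert_placeholders (sql : String) (params : Option (List String)) : Prop :=
  params.getD [] = [] ∨ sql.toList.count '?' ≤ (params.getD []).length
instance (sql : String) (params : Option (List String)) : Decidable (Pre_convert_placeholders sql params) := by
  unfold Pre_convert_placeholders; infer_instance

def pvWitness_convert_placeholders : String × Option (List String) := ("select * from t where a = ? and b = ?", some ["1", "x"])

def Spec_convert_placeholders (sql : String) (params : Option (List String)) (out : String × (List (String × String))) : Prop := out = convert_placeholders_alt sql params
instance (sql : String) (params : Option (List String)) (out : String × (List (String × String))) : Decidable (Spec_convert_placeholders sql params out) := by unfold Spec_convert_placeholders; infer_instance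

-- ===== CLAIM (what is proved, stated in full; the proofs are below) =====
def Claim_equal_convert_placeholders : Prop := ∀ (sql : String) (params : Option (List String)), Dom_convert_placeholders sql params → Pre_convert_placeholders sql params → Spec_convert_placeholders sql params (convert_placeholders sql params)

-- ===== LEMMAS AND PROOFS =====

-- decimal decode, to establish injectivity of Nat.toDigits 10
def pvDec (l : List Char) : Nat := l.foldl (fun a c => a * 10 + (c.toNat - 48)) 0

lemma pvToDigitsCore_append : ∀ (f n : Nat) (ds : List Char),
    Nat.toDigitsCore 10 f n ds = Nat.toDigitsCore 10 f n [] ++ ds := by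
  intro f
  induction f with
  | zero => intro n ds; simp [Nat.toDigitsCore]
  | succ f ih =>
    intro n ds
    simp only [Nat.toDigitsCore]
    by_cases h : n / 10 = 0
    · simp [h]
    · simp only [h, if_false]
      rw [ih (n / 10) ((n % 10).digitChar :: ds), ih (n / 10) [(n % 10).digitChar]]
      simp

lemma pvDec_toDigitsCore : ∀ (f n : Nat), n < f → pvDec (Nat.toDigitsCore 10 f n []) = n := by
  intro f
  induction f with
  | zero => intro n h; omega
  | succ f ih =>
    intro n h
    simp only [Nat.toDigitsCore]
    by_cases h0 : n / 10 = 0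
    · have hn : n < 10 := by omega
      simp only [h0, if_true]
      have : n % 10 = n := Nat.mod_eq_of_lt hn
      rw [this]
      interval_cases n <;> decide
    · simp only [h0, if_false]
      rw [pvToDigitsCore_append]
      have h10 : 10 ≤ n := by
        by_contra hc
        exact h0 (Nat.div_eq_of_lt (by omega))
      have hlt : n / 10 < f := by
        have := Nat.div_lt_self (by omega : 0 < n) (by omega : 1 < 10)
        omega
      have hd : ((n % 10).digitChar).toNat - 48 = n % 10 := by
        have : n % 10 < 10 := Nat.mod_lt _ (by omega)
        interval_cases h : (n % 10) <;> decide
      simp only [pvDec, List.foldl_append, List.foldl_cons, List.foldl_nil]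
      have := ih (n / 10) hlt
      simp only [pvDec] at this
      rw [this, hd]
      omega

lemma pvToDigits_inj {m n : Nat} (h : Nat.toDigits 10 m = Nat.toDigits 10 n) : m = n := by
  have hm := pvDec_toDigitsCore (m + 1) m (by omega)
  have hn := pvDec_toDigitsCore (n + 1) n (by omega)
  unfold Nat.toDigits at h
  rw [h] at hm
  omega

lemma pvName_inj {i j : Int} (hi : 0 ≤ i) (hj : 0 ≤ j)
    (h : ("p" ++ PySem.Int.toStr i) = ("p" ++ PySem.Int.toStr j)) : i = j := by
  have h2 := congrArg String.toList h
  simp only [String.toList_append, List.append_cancel_left_eq, PySem.Int.toList_toStr] at h2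
  unfold PySem.Int.toChars at h2
  rw [if_neg (by omega), if_neg (by omega)] at h2
  have := pvToDigits_inj h2
  omega

-- what A's loop produces, character-directed
def specStr (cs : List Char) (k : Int) : List Char :=
  match cs with
  | [] => []
  | c :: rest =>
    if c = '?' then ('{' :: ("p" ++ PySem.Int.toStr k).toList ++ ['}']) ++ specStr rest (k + 1)
    else c :: specStr rest k

def specDict (ps : List String) (cs : List Char) (k : Int) : List (String × String) :=
  match cs with
  | [] => []
  | c :: rest =>
    if c = '?' then ("p" ++ PySem.Int.toStr k, PySem.List.pyGetD ps k "") :: specDict ps rest (k + 1)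
    else specDict ps rest k

-- A's loop equals the spec (fresh keys append to the dict)
lemma convertLoopA_eq (ps : List String) : ∀ (cs : List Char) (k : Int) (d : PySem.Dict String String) (acc : List Char),
    0 ≤ k → (∀ j : Int, k ≤ j → d.contains ("p" ++ PySem.Int.toStr j) = false) →
    convertLoopA ps cs k d acc = (acc ++ specStr cs k, PySem.Dict.mk (d.items ++ specDict ps cs k)) := by
  intro cs
  induction cs with
  | nil =>
    intro k d acc _ _
    simp [convertLoopA, specStr, specDict]
  | cons c rest ih =>
    intro k d acc hk hfresh
    by_cases hc : c = '?'
    · simp only [convertLoopA, hc, if_true, specStr, specDict]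
      rw [ih (k + 1) _ _ (by omega) ?_]
      · congr 1
        · simp
        · congr 1
          rw [PySem.Dict.items_insert_of_not_contains d _ (hfresh k le_rfl)]
          simp
      · intro j hj
        rw [PySem.Dict.contains_insert]
        have hne : ("p" ++ PySem.Int.toStr j) ≠ ("p" ++ PySem.Int.toStr k) := by
          intro he
          have := pvName_inj (by omega) hk he
          omega
        simp only [Bool.or_eq_false_iff]
        exact ⟨by simpa using hne, hfresh j (by omega)⟩
    · simp only [convertLoopA, hc, if_false, specStr, specDict]
      rw [ih k d _ hk hfresh]
      simp

-- B's join expression, with an index offset, to induct on the string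
def pvJoin (parts : List (List Char)) (k : Int) : List Char :=
  parts.headD [] ++
    ((List.range (parts.length - 1)).map (fun (i : Nat) =>
      ('{' :: ("p" ++ PySem.Int.toStr (k + ((i : Nat) : Int))).toList ++ ['}']) ++ parts.getD (i + 1) [])).flatten

lemma pvJoin_splitOn : ∀ (cs : List Char) (k : Int), pvJoin (cs.splitOn '?') k = specStr cs k := by
  intro cs
  induction cs with
  | nil => intro k; simp [List.splitOn, List.splitOnP_nil, pvJoin, specStr]
  | cons c rest ih =>
    intro k
    obtain ⟨q, qs, hq⟩ : ∃ q qs, rest.splitOn '?' = q :: qs := by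
      cases h : rest.splitOn '?' with
      | nil => exact absurd h (List.splitOnP_ne_nil _ _)
      | cons q qs => exact ⟨q, qs, rfl⟩
    by_cases hc : c = '?'
    · have hsp : (c :: rest).splitOn '?' = [] :: rest.splitOn '?' := by
        simp [List.splitOn, List.splitOnP_cons, hc]
      rw [hsp, hq]
      simp only [specStr, hc, if_true]
      rw [← ih (k + 1), hq]
      simp only [pvJoin, List.length_cons, List.headD_cons, Nat.add_sub_cancel,
        List.range_succ_eq_map, List.map_cons, List.map_map, List.flatten_cons,
        List.nil_append, List.getD_cons_succ, List.getD_cons_zero,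
        Nat.cast_zero, add_zero]
      rw [List.append_assoc]
      congr 2
      congr 1
      apply List.map_congr_left
      intro i _
      simp only [Function.comp_apply, Nat.succ_eq_add_one, List.getD_cons_succ]
      have harg : (k + ((i + 1 : Nat) : Int)) = k + 1 + (i : Int) := by push_cast; ring
      rw [harg]
    · have hsp : (c :: rest).splitOn '?' = (rest.splitOn '?').modifyHead (List.cons c) := by
        simp [List.splitOn, List.splitOnP_cons, hc]
      rw [hsp, hq]
      simp only [specStr, hc, if_false]
      rw [← ih k, hq]
      simp only [pvJoin, List.modifyHead, List.length_cons, List.headD_cons,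
        List.getD_cons_succ, List.cons_append]

lemma specDict_eq_map (ps : List String) : ∀ (cs : List Char) (k : Int),
    specDict ps cs k = (List.range (cs.count '?')).map
      (fun (i : Nat) => ("p" ++ PySem.Int.toStr (k + ((i : Nat) : Int)), PySem.List.pyGetD ps (k + ((i : Nat) : Int)) "")) := by
  intro cs
  induction cs with
  | nil => intro k; simp [specDict]
  | cons c rest ih =>
    intro k
    by_cases hc : c = '?'
    · simp only [specDict, hc, if_true, List.count_cons, beq_self_eq_true, if_true]
      rw [ih (k + 1)]
      simp only [List.range_succ_eq_map, List.map_cons, List.map_map]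
      congr 1
      · simp
      · apply List.map_congr_left
        intro i _
        simp only [Function.comp_apply, Nat.succ_eq_add_one]
        congr 2 <;> (push_cast; ring)
    · have hcnt : (c :: rest).count '?' = rest.count '?' := by
        simp [hc]
      simp only [specDict, hc, if_false, hcnt]
      exact ih k
  
lemma splitOn_length (cs : List Char) : (cs.splitOn '?').length = cs.count '?' + 1 := by
  induction cs with
  | nil => simp [List.splitOn, List.splitOnP_nil]
  | cons c rest ih =>
    by_cases hc : c = '?'
    · simp [List.splitOn, List.splitOnP_cons, hc] at *
      omega
    · simp [List.splitOn, List.splitOnP_cons, hc] at *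
      exact ih

-- ===== VERDICT (by name: the statement is the Claim_ definition above) =====
set_option maxHeartbeats 1000000 in
theorem convert_placeholders_spec : Claim_equal_convert_placeholders := by
  intro sql params _ _
  unfold Spec_convert_placeholders
  cases params with
  | none => rfl
  | some ps =>
    by_cases hps : ps = []
    · subst hps; rfl
    · have hfresh : ∀ j : Int, (0 : Int) ≤ j →
          (PySem.Dict.empty (κ := String) (ν := String)).contains ("p" ++ PySem.Int.toStr j) = false :=
        fun _ _ => rfl
      have hA := convertLoopA_eq ps sql.toList 0 PySem.Dict.empty [] le_rfl hfresh
      simp only [convert_placeholders, convert_placeholders_alt, hps, if_false]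
      rw [hA]
      refine Prod.ext ?_ ?_
      · show String.ofList ([] ++ specStr sql.toList 0) = _
        rw [List.nil_append, ← pvJoin_splitOn sql.toList 0]
        unfold pvJoin
        congr 2
        refine congrArg List.flatten (List.map_congr_left ?_)
        intro i _
        simp
      · show (PySem.Dict.mk (PySem.Dict.empty.items ++ specDict ps sql.toList 0)).items = _
        have hemp : (PySem.Dict.empty (κ := String) (ν := String)).items = [] := rfl
        simp only [hemp, List.nil_append]
        rw [specDict_eq_map ps sql.toList 0, splitOn_length]
        simp only [Nat.add_sub_cancel]
        apply List.map_congr_left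
        intro i _
        simp
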